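-- pv_equiv track=rewrite | github.com/Kersic/PomPenguinGame | PomPenguinServer/coding/coding.py | code_difference
-- ===== SOURCE A (Python) =====
-- difference_id = ['00', '01', '10', '11']
--
-- limits = [2, 6, 14, 30]
--
-- def to_bin(dec):
--     return bin(dec).split('b')[1]
--
-- def add_leading_zeros(bin_num, number_of_bits):
--     while len(bin_num) < number_of_bits:
--         bin_num = '0' + bin_num
--     return bin_num
--
-- def code_difference(num):
--     if abs(num) < 1:
--         raise ValueError("code_difference() can not code number 0, use code_repeat() ")
--     if abs(num) > 30:
--         raise ValueError("code_difference() can not code numbers higher then 30, use code_absolute_value()")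
--     bin_output = '00'
--     for j in range(len(limits)):
--         if abs(num) <= limits[j]:
--             bin_output += difference_id[j]
--             if num < 0:
--                 bin_output += add_leading_zeros(to_bin(num + limits[j]), j + 2)
--             else:
--                 bin_output += add_leading_zeros(to_bin(abs(num) + 1), j + 2)
--             break
--     return bin_output
-- ===== SOURCE B (Python) =====
-- def code_difference(num):
--     if abs(num) < 1:
--         raise ValueError("code_difference() can not code number 0, use code_repeat() ")
--     if abs(num) > 30:
--         raise ValueError("code_difference() can not code numbers higher then 30, use code_absolute_value()")
--     a = abs(num)
--     # bucket index: first j with 2**(j+2) - 2 >= a, i.e. ceil(log2(a+2)) - 2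
--     j = (a + 1).bit_length() - 2
--     value = num + (1 << (j + 2)) - 2 if num < 0 else a + 1
--     return '00' + format(j, '02b') + format(value, '0{}b'.format(j + 2))
-- ===== Notes on version B (the rewrite author's own statement) =====
-- stated objective: simpler
-- what changed: Replaces the scan over the limits table and the difference_id lookup table with a closed-form bit-length computation of the bucket index and direct binary formatting of both the 2-bit id and the padded value.
import Mathlib
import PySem

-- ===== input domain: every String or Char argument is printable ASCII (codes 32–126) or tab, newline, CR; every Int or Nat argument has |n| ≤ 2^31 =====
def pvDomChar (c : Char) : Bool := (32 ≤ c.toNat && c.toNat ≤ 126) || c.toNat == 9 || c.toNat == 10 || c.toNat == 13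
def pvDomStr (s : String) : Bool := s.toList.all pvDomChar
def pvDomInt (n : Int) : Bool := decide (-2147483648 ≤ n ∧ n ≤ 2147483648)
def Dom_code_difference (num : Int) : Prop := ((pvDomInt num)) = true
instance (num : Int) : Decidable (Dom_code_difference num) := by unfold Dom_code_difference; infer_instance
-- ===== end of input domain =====

-- B replaces A's scan over the limits table (and the difference_id lookup table) by a
-- closed-form bit-length computation of the bucket index and binary formatting: simpler, no tables.

-- ===== PORT A =====
def pyLimits : List Int := [2, 6, 14, 30]
def pyDifferenceId : List String := ["00", "01", "10", "11"]

-- bin(dec).split('b')[1]; exact for dec ≥ 0 (the only values A's code feeds it)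
def to_bin (dec : Int) : String := String.ofList (Nat.toDigits 2 dec.toNat)

-- the while loop, checked each iteration; structural recursion on a fuel that
-- bounds the iteration count exactly (each pass grows the string by one char)
def add_leading_zeros_go : Nat → String → Int → String
  | 0, bin_num, _ => bin_num
  | k + 1, bin_num, number_of_bits =>
      if (bin_num.length : Int) < number_of_bits then
        add_leading_zeros_go k ("0" ++ bin_num) number_of_bits
      else bin_num

def add_leading_zeros (bin_num : String) (number_of_bits : Int) : String :=
  add_leading_zeros_go number_of_bits.toNat bin_num number_of_bits

-- the 'for j in range(len(limits)): … break' loop, scanning the indices in order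
def code_difference_go (num : Int) (acc : String) : List Nat → String
  | [] => acc
  | j :: rest =>
      if |num| ≤ pyLimits.getD j 0 then
        acc ++ pyDifferenceId.getD j "" ++
          (if num < 0 then add_leading_zeros (to_bin (num + pyLimits.getD j 0)) ((j : Int) + 2)
           else add_leading_zeros (to_bin (|num| + 1)) ((j : Int) + 2))
      else code_difference_go num acc rest

def code_difference (num : Int) : String :=
  code_difference_go num "00" [0, 1, 2, 3]

-- ===== PORT B =====
-- format(v, '0<width>b') for v ≥ 0: binary digits left-padded with zeros to width
def fmt_bin (v : Int) (width : Nat) : String :=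
  let s := String.ofList (Nat.toDigits 2 v.toNat)
  String.ofList (List.replicate (width - s.length) '0') ++ s

def code_difference_alt (num : Int) : String :=
  let a : Nat := num.natAbs
  let j : Nat := (Nat.log2 (a + 1) + 1) - 2   -- (a+1).bit_length() - 2
  let value : Int := if num < 0 then num + 2 ^ (j + 2) - 2 else (a : Int) + 1
  "00" ++ fmt_bin (j : Int) 2 ++ fmt_bin value (j + 2)

-- ===== PRECONDITION & SPEC =====
-- A raises ValueError when abs(num) < 1 or abs(num) > 30; Pre_ admits exactly the rest.
def Pre_code_difference (num : Int) : Prop := num ≠ 0 ∧ -30 ≤ num ∧ num ≤ 30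
instance (num : Int) : Decidable (Pre_code_difference num) := by unfold Pre_code_difference; infer_instance
def pvWitness_code_difference : Int := (5)

def Spec_code_difference (num : Int) (out : String) : Prop := out = code_difference_alt num
instance (num : Int) (out : String) : Decidable (Spec_code_difference num out) := by unfold Spec_code_difference; infer_instance

-- ===== CLAIM (what is proved, stated in full; the proofs are below) =====
def Claim_equal_code_difference : Prop := ∀ (num : Int), Dom_code_difference num → Pre_code_difference num → Spec_code_difference num (code_difference num)

-- ===== LEMMAS AND PROOFS =====

-- ===== VERDICT (by name: the statement is the Claim_ definition above) =====
theorem code_difference_spec : Claim_equal_code_difference := by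
  intro num _ hp
  obtain ⟨h0, h1, h2⟩ := hp
  unfold Spec_code_difference
  interval_cases num <;> first | omega | decide
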